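-- pv_equiv track=rewrite | github.com/KULeuven-MICAS/snax-mlir | compiler/transforms/add_tiling_sequence.py | get_interchange
-- ===== SOURCE A (Python) =====
-- def get_interchange(order: list[str]):
--     """
--     Translate string order to a list of integers, where M = 0, N = 1, K = 2.
--     """
--     translation = {"M": 0, "N": 1, "K": 2}
--     pre_translated = [translation[order[i]] for i in range(len(order))]
--     while len(pre_translated) != 3:
--         if 0 not in pre_translated:
--             pre_translated.insert(0, 0)
--         elif 1 not in pre_translated:
--             pre_translated.insert(0, 1)
--         elif 2 not in pre_translated:
--             pre_translated.insert(0, 2)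
--     return pre_translated
-- ===== SOURCE B (Python) =====
-- def get_interchange(order: list[str]):
--     """
--     Translate string order to a list of integers, where M = 0, N = 1, K = 2.
--     """
--     translation = {"M": 0, "N": 1, "K": 2}
--     translated = [translation[c] for c in order]
--     need = 3 - len(translated)
--     missing = [v for v in (0, 1, 2) if v not in translated][:need]
--     return missing[::-1] + translated
-- ===== Notes on version B (the rewrite author's own statement) =====
-- stated objective: simpler
-- what changed: Replaces A's while-loop that repeatedly re-scans the list and inserts at the front with a one-shot computation of the missing values (complement of {0,1,2}, sliced and reversed) concatenated before the translation.
-- outside the precondition, e.g. on get_interchange(['M', 'N', 'K', 'M']): A does not finish within the time limit, B returns [0, 1, 2, 0]; on get_interchange(['X']): A raises KeyError, B raises KeyError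
import Mathlib
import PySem

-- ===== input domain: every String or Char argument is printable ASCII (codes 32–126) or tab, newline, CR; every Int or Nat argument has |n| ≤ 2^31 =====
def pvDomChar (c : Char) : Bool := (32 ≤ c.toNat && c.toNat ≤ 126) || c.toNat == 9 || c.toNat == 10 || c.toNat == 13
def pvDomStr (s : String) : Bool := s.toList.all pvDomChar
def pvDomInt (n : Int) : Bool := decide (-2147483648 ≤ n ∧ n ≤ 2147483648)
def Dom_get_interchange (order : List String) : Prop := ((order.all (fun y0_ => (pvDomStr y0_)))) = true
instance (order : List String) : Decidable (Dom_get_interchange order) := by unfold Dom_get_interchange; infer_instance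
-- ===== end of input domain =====

-- B replaces A's while-loop (re-scan + insert at front) by a one-shot complement-and-concatenate; objective: simpler.


-- ===== PORT A =====
-- translation = {"M": 0, "N": 1, "K": 2}
def pvTranslation : PySem.Dict String Int :=
  (PySem.Dict.empty.insert "M" 0).insert "N" 1 |>.insert "K" 2
-- dict lookup; the .getD 0 placeholder is only reached on a KeyError input, which Pre_ excludes
def pvLookup (s : String) : Int := (PySem.Dict.get? pvTranslation s).getD 0
-- the while loop; fuel 3 bounds the number of inserts, which within Pre_ is at most 3
-- (Python's loop diverges when len(order) > 3; Pre_ excludes those inputs)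
def pvLoopA : Nat → List Int → List Int
  | 0, l => l
  | n+1, l =>
    if l.length ≠ 3 then
      if ¬ l.contains 0 then pvLoopA n (PySem.List.insert l 0 0)
      else if ¬ l.contains 1 then pvLoopA n (PySem.List.insert l 0 1)
      else if ¬ l.contains 2 then pvLoopA n (PySem.List.insert l 0 2)
      else l
    else l
def get_interchange (order : List String) : List Int :=
  pvLoopA 3 (order.map pvLookup)

-- ===== PORT B =====
def get_interchange_alt (order : List String) : List Int :=
  let translated := order.map pvLookup
  let need : Int := 3 - (translated.length : Int)
  let missing := PySem.List.slice (([0, 1, 2] : List Int).filter (fun v => ¬ translated.contains v)) none (some need)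
  missing.reverse ++ translated

-- ===== PRECONDITION & SPEC =====
-- Pre_ excludes inputs with a string other than "M"/"N"/"K" (A raises KeyError) and
-- inputs longer than 3 (A's while loop never terminates there).
def Pre_get_interchange (order : List String) : Prop :=
  order.length ≤ 3 ∧ (order.all (fun s => s == "M" || s == "N" || s == "K")) = true
instance (order : List String) : Decidable (Pre_get_interchange order) := by
  unfold Pre_get_interchange; infer_instance
def pvWitness_get_interchange : List String := ["N", "M"]
def Spec_get_interchange (order : List String) (out : List Int) : Prop := out = get_interchange_alt order
instance (order : List String) (out : List Int) : Decidable (Spec_get_interchange order out) := by unfold Spec_get_interchange; infer_instance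

-- ===== CLAIM (what is proved, stated in full; the proofs are below) =====
def Claim_equal_get_interchange : Prop := ∀ (order : List String), Dom_get_interchange order → Pre_get_interchange order → Spec_get_interchange order (get_interchange order)

-- ===== LEMMAS AND PROOFS =====

-- ===== VERDICT (by name: the statement is the Claim_ definition above) =====
theorem get_interchange_spec : Claim_equal_get_interchange := by
  intro order _ hpre
  obtain ⟨hlen, hmem⟩ := hpre
  unfold Spec_get_interchange
  match order, hlen, hmem with
  | [], _, _ => decide
  | [a], _, hmem
  | [a, b], _, hmem
  | [a, b, c], _, hmem =>
    simp only [List.all_cons, List.all_nil, Bool.and_eq_true, Bool.or_eq_true, beq_iff_eq] at hmem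
    rcases hmem with ⟨(ha | ha) | ha, hr⟩ <;> subst ha <;>
      first
      | decide
      | (rcases hr with ⟨(hb | hb) | hb, hr2⟩ <;> subst hb <;>
          first
          | decide
          | (rcases hr2 with ⟨(hc | hc) | hc, -⟩ <;> subst hc <;> decide))
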